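-- pv_equiv track=rewrite | github.com/deepriver-ai/apify_client | src/models/facebook_post.py | _infer_facebook_post_type
-- ===== SOURCE A (Python) =====
-- from typing import Any, Dict, List
--
-- def _infer_facebook_post_type(media: List[Dict[str, Any]], url: str) -> str:
--     """Infer Facebook post type from media content and URL."""
--     if "/reel/" in url:
--         return "Reel"
--     if not media:
--         return "Status"
--     type_names = {m.get("__typename") for m in media}
--     if "Video" in type_names:
--         return "Video"
--     if "Photo" in type_names:
--         return "Photo"
--     return "Status"
-- ===== SOURCE B (Python) =====
-- def _infer_facebook_post_type(media, url):
--     """Infer Facebook post type from media content and URL."""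
--     if "/reel/" in url:
--         return "Reel"
--     rank = {"Video": 2, "Photo": 1}
--     best = 0
--     for m in media:
--         best = max(best, rank.get(m.get("__typename"), 0))
--     return ("Status", "Photo", "Video")[best]
-- ===== Notes on version B (the rewrite author's own statement) =====
-- stated objective: alternative
-- what changed: Replaced the set of typenames and the chain of membership tests with a numeric priority reduction: each media item is mapped to a rank (Video=2, Photo=1, other=0), the maximum rank is folded over the list, and the answer is read from a tuple indexed by that rank; the empty-media guard disappears because the fold's identity 0 already yields 'Status'.
import Mathlib
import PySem

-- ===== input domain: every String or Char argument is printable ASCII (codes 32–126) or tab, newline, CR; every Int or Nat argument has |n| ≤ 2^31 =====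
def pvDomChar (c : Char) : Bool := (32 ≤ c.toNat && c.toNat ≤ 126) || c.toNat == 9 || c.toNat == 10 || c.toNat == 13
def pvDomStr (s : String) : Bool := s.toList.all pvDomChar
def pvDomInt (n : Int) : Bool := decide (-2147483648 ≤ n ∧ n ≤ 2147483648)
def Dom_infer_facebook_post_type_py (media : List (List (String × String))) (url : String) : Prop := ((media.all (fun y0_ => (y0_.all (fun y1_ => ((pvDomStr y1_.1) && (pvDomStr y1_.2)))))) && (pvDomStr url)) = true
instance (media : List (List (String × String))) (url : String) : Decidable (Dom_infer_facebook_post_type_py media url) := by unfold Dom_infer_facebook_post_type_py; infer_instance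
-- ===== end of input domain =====

-- B replaces A's typename set and membership-test chain with a numeric priority
-- reduction (max of per-item ranks, answer read from a table): alternative decomposition.

-- m.get(k): association-list lookup, first match, None if absent (Python dict.get)
def pvDictGet (m : List (String × String)) (k : String) : Option String :=
  (m.find? (fun p => p.1 == k)).map (fun p => p.2)

-- ===== PORT A =====
def infer_facebook_post_type_py (media : List (List (String × String))) (url : String) : String :=
  if PySem.Str.isIn "/reel/" url then "Reel"
  else if media = [] then "Status"
  else
    let type_names : PySem.Set (Option String) :=
      PySem.Set.ofList (media.map (fun m => pvDictGet m "__typename"))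
    if PySem.Set.contains type_names (some "Video") then "Video"
    else if PySem.Set.contains type_names (some "Photo") then "Photo"
    else "Status"

-- ===== PORT B =====
-- rank.get(t, 0) on the dict {"Video": 2, "Photo": 1} (a None key matches nothing)
def pvRank (t : Option String) : Nat :=
  match t with
  | some s => ((([("Video", 2), ("Photo", 1)] : List (String × Nat)).find? (fun p => p.1 == s)).map (fun p => p.2)).getD 0
  | none => 0

-- the for-loop of Source B: best = max(best, rank.get(...)) over media
def pvBestLoop (media : List (List (String × String))) (best : Nat) : Nat :=
  media.foldl (fun b m => max b (pvRank (pvDictGet m "__typename"))) best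

def infer_facebook_post_type_py_alt (media : List (List (String × String))) (url : String) : String :=
  if PySem.Str.isIn "/reel/" url then "Reel"
  else
    -- tuple index: best is always 0, 1 or 2, so List.getD is exact here
    (["Status", "Photo", "Video"] : List String).getD (pvBestLoop media 0) "Status"

-- ===== PRECONDITION & SPEC =====
def Spec_infer_facebook_post_type_py (media : List (List (String × String))) (url : String) (out : String) : Prop := out = infer_facebook_post_type_py_alt media url
instance (media : List (List (String × String))) (url : String) (out : String) : Decidable (Spec_infer_facebook_post_type_py media url out) := by unfold Spec_infer_facebook_post_type_py; infer_instance

-- ===== CLAIM =====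
def Claim_equal_infer_facebook_post_type_py : Prop := ∀ (media : List (List (String × String))) (url : String), Dom_infer_facebook_post_type_py media url → Spec_infer_facebook_post_type_py media url (infer_facebook_post_type_py media url)

-- ===== LEMMAS AND PROOFS =====

-- cons step of the priority value: prepending m takes the max with m's rank
theorem pvPrio_cons (m : List (String × String)) (rest : List (List (String × String))) :
    (if (∃ x ∈ m :: rest, pvDictGet x "__typename" = some "Video") then 2
      else if (∃ x ∈ m :: rest, pvDictGet x "__typename" = some "Photo") then 1
      else 0)
    = max (pvRank (pvDictGet m "__typename"))
        (if (∃ x ∈ rest, pvDictGet x "__typename" = some "Video") then 2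
          else if (∃ x ∈ rest, pvDictGet x "__typename" = some "Photo") then 1
          else 0) := by
  have r2 : pvRank (some "Video") = 2 := rfl
  have r1 : pvRank (some "Photo") = 1 := rfl
  by_cases hv : pvDictGet m "__typename" = some "Video"
  · simp only [List.exists_mem_cons_iff, hv, r2, true_or, if_true]
    split_ifs <;> omega
  · by_cases hp : pvDictGet m "__typename" = some "Photo"
    · have hne : ¬(some "Photo" = some ("Video" : String)) := by decide
      simp only [List.exists_mem_cons_iff, hp, r1, hne, false_or, true_or, if_true]
      split_ifs <;> omega
    · have h0 : pvRank (pvDictGet m "__typename") = 0 := by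
        unfold pvRank
        cases ht : pvDictGet m "__typename" with
        | none => rfl
        | some str =>
          rw [ht] at hv hp
          simp only [List.find?]
          have hs1 : ("Video" == str) = false :=
            beq_eq_false_iff_ne.mpr (fun h => hv (by rw [← h]))
          have hs2 : ("Photo" == str) = false :=
            beq_eq_false_iff_ne.mpr (fun h => hp (by rw [← h]))
          simp [hs1, hs2]
      simp only [List.exists_mem_cons_iff, hv, hp, h0, false_or]
      split_ifs <;> omega

-- the fold computes max acc (2 if a Video is present, else 1 if a Photo, else 0)
theorem pvBestLoop_spec (media : List (List (String × String))) (acc : Nat) :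
    pvBestLoop media acc =
      max acc (if (∃ m ∈ media, pvDictGet m "__typename" = some "Video") then 2
        else if (∃ m ∈ media, pvDictGet m "__typename" = some "Photo") then 1
        else 0) := by
  induction media generalizing acc with
  | nil => simp [pvBestLoop]
  | cons m rest ih =>
    simp only [pvBestLoop, List.foldl_cons] at *
    rw [ih, pvPrio_cons]
    omega

theorem mem_set_iff (media : List (List (String × String))) (v : Option String) :
    PySem.Set.contains (PySem.Set.ofList (media.map (fun m => pvDictGet m "__typename"))) v = true
      ↔ ∃ m ∈ media, pvDictGet m "__typename" = v := by
  rw [PySem.Set.contains_iff, PySem.Set.mem_ofList]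
  simp [eq_comm]

-- ===== VERDICT =====
theorem infer_facebook_post_type_py_spec : Claim_equal_infer_facebook_post_type_py := by
  intro media url _
  unfold Spec_infer_facebook_post_type_py infer_facebook_post_type_py infer_facebook_post_type_py_alt
  rw [pvBestLoop_spec]
  by_cases hr : PySem.Chars.isIn ['/', 'r', 'e', 'e', 'l', '/'] url.toList
  · simp [PySem.Str.isIn, hr]
  · by_cases he : media = []
    · subst he; simp [hr]
    · by_cases hv : (∃ m ∈ media, pvDictGet m "__typename" = some "Video") <;>
        by_cases hp : (∃ m ∈ media, pvDictGet m "__typename" = some "Photo") <;>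
        simp [hr, he, hv, hp, List.getD, mem_set_iff]
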